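-- pv_equiv track=rewrite | github.com/pazdaninho/kowno | run.py | cidr_to_bin
-- ===== SOURCE A (Python) =====
-- def cidr_to_bin(bits):
--     end = 32 - bits
--     mesut = str(bits * '1')+str(end * '0')
--     l=[]
--     for num, bit in enumerate(mesut):
--         l.append(bit)
--         if (num+1) %8 == 0:
--             l.append('.')
--     return ''.join(l).strip('.')
-- ===== SOURCE B (Python) =====
-- def cidr_to_bin(bits):
--     s = bits * '1' + (32 - bits) * '0'
--     return '.'.join(s[i:i + 8] for i in range(0, len(s), 8))
-- ===== Notes on version B (the rewrite author's own statement) =====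
-- stated objective: idiomatic
-- what changed: Replaces the per-character enumerate loop with its modulo-8 counter, dot-append list and final strip('.') by slicing the mask string into 8-character chunks with a step-8 range and joining them with '.', which inserts dots only between chunks and needs no strip.
import Mathlib
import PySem

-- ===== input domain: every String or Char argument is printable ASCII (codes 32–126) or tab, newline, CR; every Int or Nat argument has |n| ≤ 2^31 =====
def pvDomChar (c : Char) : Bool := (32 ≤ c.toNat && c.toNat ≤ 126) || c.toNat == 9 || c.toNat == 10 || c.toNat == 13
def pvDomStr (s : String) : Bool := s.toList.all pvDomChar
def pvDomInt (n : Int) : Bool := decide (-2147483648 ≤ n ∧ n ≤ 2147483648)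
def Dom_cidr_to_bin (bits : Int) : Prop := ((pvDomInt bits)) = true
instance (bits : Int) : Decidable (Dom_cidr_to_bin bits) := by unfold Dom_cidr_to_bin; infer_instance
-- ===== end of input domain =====

-- B replaces A's per-character loop with modulo-8 counter and final strip('.') by
-- slicing the mask into 8-char chunks (step-8 range) joined with '.' (idiomatic; same cost).


-- ===== PORT A =====
def cidr_to_bin (bits : Int) : String :=
  let endv := 32 - bits
  let mesut := PySem.List.pyRepeat ['1'] bits ++ PySem.List.pyRepeat ['0'] endv
  let l := (PySem.List.enumerate mesut 0).foldl
    (fun l nb =>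
      let l := l ++ [nb.2]
      if PySem.Int.mod (nb.1 + 1) 8 == 0 then l ++ ['.'] else l) ([] : List Char)
  String.mk (PySem.Chars.stripChars l ['.'])

-- ===== PORT B =====
def cidr_to_bin_alt (bits : Int) : String :=
  let s := PySem.List.pyRepeat ['1'] bits ++ PySem.List.pyRepeat ['0'] (32 - bits)
  String.mk (PySem.Chars.join ['.']
    ((PySem.List.pyRange 0 (s.length : Int) 8).map
      (fun i => PySem.List.slice s (some i) (some (i + 8)))))

-- ===== PRECONDITION & SPEC =====
def Spec_cidr_to_bin (bits : Int) (out : String) : Prop := out = cidr_to_bin_alt bits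
instance (bits : Int) (out : String) : Decidable (Spec_cidr_to_bin bits out) := by unfold Spec_cidr_to_bin; infer_instance

-- ===== CLAIM (what is proved, stated in full; the proofs are below) =====
def Claim_equal_cidr_to_bin : Prop := ∀ (bits : Int), Dom_cidr_to_bin bits → Spec_cidr_to_bin bits (cidr_to_bin bits)

-- ===== LEMMAS AND PROOFS =====

-- A's loop body, written as structural recursion carrying the running index.
def gA : List Char → Int → List Char
  | [], _ => []
  | c :: t, s =>
    c :: (if PySem.Int.mod (s + 1) 8 == 0 then '.' :: gA t (s + 1) else gA t (s + 1))

-- A's pre-strip output, with a countdown phase j = characters left until the next dot.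
def jt : List Char → Nat → List Char
  | [], _ => []
  | c :: t, j => if j = 1 then c :: '.' :: jt t 8 else c :: jt t (j - 1)

-- 8-character chunks of a list.
def chunks8 (cs : List Char) : List (List Char) :=
  if h : cs = [] then [] else cs.take 8 :: chunks8 (cs.drop 8)
termination_by cs.length
decreasing_by
  cases cs with
  | nil => exact absurd rfl h
  | cons a t => simp only [List.length_drop, List.length_cons]; omega

lemma foldlA_eq_gA (cs : List Char) (s : Int) (acc : List Char) :
    (PySem.List.enumerate cs s).foldl
      (fun l nb =>
        let l := l ++ [nb.2]
        if PySem.Int.mod (nb.1 + 1) 8 == 0 then l ++ ['.'] else l) acc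
      = acc ++ gA cs s := by
  induction cs generalizing s acc with
  | nil => simp [PySem.List.enumerate_nil, gA]
  | cons c t ih =>
    rw [PySem.List.enumerate_cons, List.foldl_cons, ih]
    by_cases h : (8 : Int) ∣ (s + 1) <;> simp [h, gA]

lemma gA_eq_jt (cs : List Char) (s : Int) (j : Nat) (h1 : 1 ≤ j) (h2 : j ≤ 8)
    (hm : PySem.Int.mod s 8 = 8 - (j : Int)) : gA cs s = jt cs j := by
  induction cs generalizing s j with
  | nil => simp [gA, jt]
  | cons c t ih =>
    rw [PySem.Int.mod_eq_emod_of_pos (show (0:Int) < 8 by norm_num)] at hm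
    by_cases hj : j = 1
    · subst hj
      have hd : (8 : Int) ∣ (s + 1) := by omega
      have ht := ih (s + 1) 8 (by omega) (by omega) (by
        rw [PySem.Int.mod_eq_emod_of_pos (show (0:Int) < 8 by norm_num)]; push_cast; omega)
      simp [gA, jt, hd, ht]
    · have hd : ¬ (8 : Int) ∣ (s + 1) := by omega
      have ht := ih (s + 1) (j - 1) (by omega) (by omega) (by
        rw [PySem.Int.mod_eq_emod_of_pos (show (0:Int) < 8 by norm_num)]
        have : ((j - 1 : Nat) : Int) = (j : Int) - 1 := by omega
        omega)
      simp [gA, jt, hd, hj, ht]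

lemma jt_small (cs : List Char) (j : Nat) (h : cs.length < j) : jt cs j = cs := by
  induction cs generalizing j with
  | nil => simp [jt]
  | cons c t ih =>
    simp only [List.length_cons] at h
    have hj : ¬ j = 1 := by omega
    simp [jt, hj, ih (j - 1) (by omega)]

lemma jt_big (cs : List Char) (j : Nat) (h1 : 1 ≤ j) (h2 : j ≤ cs.length) :
    jt cs j = cs.take j ++ '.' :: jt (cs.drop j) 8 := by
  induction cs generalizing j with
  | nil => simp at h2; omega
  | cons c t ih =>
    cases j with
    | zero => omega
    | succ n =>
      by_cases hn : n = 0
      · subst hn; simp [jt]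
      · have h2' : n ≤ t.length := by simp at h2; omega
        have hstep : jt (c :: t) (n + 1) = c :: jt t n := by
          rw [jt]; simp [hn]
        rw [hstep, ih n (by omega) h2']
        simp [List.take_succ_cons, List.drop_succ_cons]

lemma chunks8_nil : chunks8 [] = [] := by rw [chunks8]; simp

lemma chunks8_cons (cs : List Char) (h : cs ≠ []) :
    chunks8 cs = cs.take 8 :: chunks8 (cs.drop 8) := by
  rw [chunks8]; simp [h]

lemma pr8_nil (n : Int) (h : n ≤ 0) : PySem.List.pyRange 0 n 8 = [] := by
  unfold PySem.List.pyRange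
  simp only [if_neg (by norm_num : ¬ (8:Int) = 0)]
  rw [if_pos (by norm_num : (0:Int) < 8), if_neg (by omega : ¬ (0:Int) < n)]
  rfl

lemma pr8_step (n : Int) (h : 0 < n) :
    PySem.List.pyRange 0 n 8 = 0 :: (PySem.List.pyRange 0 (n - 8) 8).map (· + 8) := by
  unfold PySem.List.pyRange
  simp only [if_neg (by norm_num : ¬ (8:Int) = 0)]
  rw [if_pos (by norm_num : (0:Int) < 8), if_pos (by omega : (0:Int) < n),
      if_pos (by norm_num : (0:Int) < 8)]
  by_cases h8 : 0 < n - 8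
  · rw [if_pos h8]
    have hc : ((n - 0 + 8 - 1) / 8).toNat = ((n - 8 - 0 + 8 - 1) / 8).toNat + 1 := by omega
    rw [hc, List.range_succ_eq_map]
    simp only [List.map_cons, List.map_map, Nat.cast_zero]
    refine congrArg₂ _ (by norm_num) ?_
    apply List.map_congr_left
    intro k _
    simp [Nat.succ_eq_add_one]
    ring
  · rw [if_neg h8]
    have hc : ((n - 0 + 8 - 1) / 8).toNat = 1 := by omega
    rw [hc]
    rfl

-- jt at phase 8 is the dot-join of the chunks, plus a trailing dot iff the length is
-- a positive multiple of 8.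
lemma jt_eq_join_chunks (cs : List Char) :
    jt cs 8 = PySem.Chars.join ['.'] (chunks8 cs)
      ++ (if cs ≠ [] ∧ cs.length % 8 = 0 then ['.'] else []) := by
  by_cases hne : cs = []
  · subst hne; simp [jt, chunks8_nil, PySem.Chars.join_nil]
  · by_cases hlen : cs.length < 8
    · have h0 : 0 < cs.length := List.length_pos_iff.mpr hne
      rw [jt_small cs 8 hlen, chunks8_cons cs hne,
          show cs.drop 8 = [] from by rw [List.drop_eq_nil_iff]; omega,
          chunks8_nil, List.take_of_length_le (by omega), PySem.Chars.join_singleton,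
          if_neg (by rintro ⟨-, hm⟩; omega)]
      simp
    · have h8 : 8 ≤ cs.length := by omega
      rw [jt_big cs 8 (by omega) h8]
      by_cases hd : cs.drop 8 = []
      · have hlen8 : cs.length ≤ 8 := by
          have := List.drop_eq_nil_iff.mp hd; omega
        rw [hd, chunks8_cons cs hne, hd, chunks8_nil, PySem.Chars.join_singleton,
            List.take_of_length_le (by omega), if_pos ⟨hne, by omega⟩]
        simp [jt]
      · have hlen8 : 8 < cs.length := by
          by_contra hcon
          exact hd (by rw [List.drop_eq_nil_iff]; omega)
        rw [jt_eq_join_chunks (cs.drop 8), chunks8_cons cs hne, chunks8_cons (cs.drop 8) hd,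
            PySem.Chars.join_cons_cons, ← chunks8_cons (cs.drop 8) hd]
        have hcond : (cs.drop 8 ≠ [] ∧ (cs.drop 8).length % 8 = 0)
            ↔ (cs ≠ [] ∧ cs.length % 8 = 0) := by
          simp only [List.length_drop]
          constructor
          · rintro ⟨-, hm⟩; exact ⟨hne, by omega⟩
          · rintro ⟨-, hm⟩; exact ⟨hd, by omega⟩
        rw [if_congr hcond rfl rfl]
        simp [List.append_assoc]
termination_by cs.length
decreasing_by
  cases cs with
  | nil => exact absurd rfl hne
  | cons a t => simp only [List.length_drop, List.length_cons]; omega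

-- B's slice-map over the step-8 range is exactly the chunk list.
lemma map_slice_eq_chunks8 (cs : List Char) :
    (PySem.List.pyRange 0 (cs.length : Int) 8).map
      (fun i => PySem.List.slice cs (some i) (some (i + 8))) = chunks8 cs := by
  by_cases hne : cs = []
  · subst hne
    rw [show ((([] : List Char).length : Int)) = 0 from rfl, pr8_nil 0 (by omega), chunks8_nil]
    rfl
  · have hpos : (0:Int) < (cs.length : Int) := by
      have := List.length_pos_iff.mpr hne; exact_mod_cast this
    rw [pr8_step _ hpos, chunks8_cons cs hne]
    simp only [List.map_cons, List.map_map]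
    refine congrArg₂ _ ?_ ?_
    · rw [PySem.List.slice_toNat cs (by norm_num) (by norm_num)]
      simp
    · have hlen : ((cs.drop 8).length : Int) = (cs.length : Int) - 8 ∨ (cs.length ≤ 8) := by
        simp only [List.length_drop]; omega
      rcases hlen with hlen | hlen
      · rw [← hlen] at *
        rw [← map_slice_eq_chunks8 (cs.drop 8)]
        apply List.map_congr_left
        intro i hi
        have hi0 : 0 ≤ i := by
          obtain ⟨h1, -, -⟩ :=
            ((PySem.List.mem_pyRange_iff_of_pos (by norm_num : (0:Int) < 8)) i).mp hi
          exact h1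
        simp only [Function.comp_apply]
        rw [PySem.List.slice_toNat cs (by omega) (by omega),
            PySem.List.slice_toNat (cs.drop 8) hi0 (by omega)]
        have e1 : (i + 8).toNat = i.toNat + 8 := by omega
        have e2 : (i + 8 + 8).toNat = i.toNat + 16 := by omega
        rw [e1, e2, List.drop_drop]
        congr 1
        · omega
        · congr 1
          omega
      · rw [pr8_nil _ (by omega), show (cs.drop 8) = [] from by
              rw [List.drop_eq_nil_iff]; omega, chunks8_nil]
        rfl
termination_by cs.length
decreasing_by
  cases cs with
  | nil => exact absurd rfl hne
  | cons a t => simp only [List.length_drop, List.length_cons]; omega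

lemma join_chunks_head_last (cs : List Char) (h : cs ≠ []) :
    PySem.Chars.join ['.'] (chunks8 cs) ≠ []
    ∧ (PySem.Chars.join ['.'] (chunks8 cs)).head? = cs.head?
    ∧ (PySem.Chars.join ['.'] (chunks8 cs)).getLast? = cs.getLast? := by
  by_cases hd : cs.drop 8 = []
  · have htake : cs.take 8 = cs := List.take_of_length_le (by
      have := List.drop_eq_nil_iff.mp hd; omega)
    rw [chunks8_cons cs h, hd, chunks8_nil, PySem.Chars.join_singleton, htake]
    exact ⟨h, rfl, rfl⟩
  · obtain ⟨hne', hh', hl'⟩ := join_chunks_head_last (cs.drop 8) hd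
    rw [chunks8_cons cs h, chunks8_cons (cs.drop 8) hd, PySem.Chars.join_cons_cons,
        ← chunks8_cons (cs.drop 8) hd]
    have htne : cs.take 8 ≠ [] := by
      simp only [ne_eq, List.take_eq_nil_iff, not_or]
      exact ⟨by omega, h⟩
    refine ⟨by simp [htne], ?_, ?_⟩
    · rw [List.append_assoc, List.head?_append_of_ne_nil _ htne]
      conv_rhs => rw [← List.take_append_drop 8 cs]
      rw [List.head?_append_of_ne_nil _ htne]
    · rw [List.append_assoc, List.getLast?_append, List.getLast?_append, hl']
      conv_rhs => rw [← List.take_append_drop 8 cs]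
      rw [List.getLast?_append]
      cases hgl : (cs.drop 8).getLast? with
      | none => exact absurd (List.getLast?_eq_none_iff.mp hgl) hd
      | some b => rfl
termination_by cs.length
decreasing_by
  cases cs with
  | nil => exact absurd rfl h
  | cons a t => simp only [List.length_drop, List.length_cons]; omega

lemma stripChars_dots (x dots : List Char) (hd : ∀ c ∈ dots, c = '.')
    (h1 : x.head? ≠ some '.') (h2 : x.getLast? ≠ some '.') :
    PySem.Chars.stripChars (x ++ dots) ['.'] = x := by
  rw [show PySem.Chars.stripChars (x ++ dots) ['.']
      = (List.dropWhile (fun c => ['.'].contains c)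
          (List.dropWhile (fun c => ['.'].contains c) (x ++ dots)).reverse).reverse from rfl]
  cases x with
  | nil =>
    have hdw : List.dropWhile (fun c => ['.'].contains c) dots = [] :=
      List.dropWhile_eq_nil_iff.mpr (fun c hc => by simp [hd c hc])
    rw [List.nil_append, hdw]
    rfl
  | cons a t =>
    have ha : a ≠ '.' := by intro h; exact h1 (by simp [h])
    have hda : List.dropWhile (fun c => ['.'].contains c) ((a :: t) ++ dots)
        = (a :: t) ++ dots := by
      rw [List.cons_append, List.dropWhile_cons, if_neg (by simp [ha])]
    rw [hda, List.reverse_append, List.dropWhile_append]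
    have hdots : (List.dropWhile (fun c => ['.'].contains c) dots.reverse).isEmpty = true := by
      rw [List.isEmpty_iff, List.dropWhile_eq_nil_iff]
      intro c hc
      simp [hd c (List.mem_reverse.mp hc)]
    rw [if_pos hdots]
    have hrevne : (a :: t).reverse ≠ [] := by simp
    obtain ⟨b, rest, hbr⟩ := List.exists_cons_of_ne_nil hrevne
    have hb : b ≠ '.' := by
      intro h
      apply h2
      rw [← List.head?_reverse, hbr, h]; rfl
    rw [hbr, List.dropWhile_cons, if_neg (by simp [hb]), ← hbr, List.reverse_reverse]

lemma mem_mask_ne_dot (bits : Int) (c : Char)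
    (h : c ∈ PySem.List.pyRepeat ['1'] bits ++ PySem.List.pyRepeat ['0'] (32 - bits)) :
    c ≠ '.' := by
  simp only [PySem.List.pyRepeat, List.mem_append, List.mem_flatten] at h
  rcases h with ⟨l, hl, hc⟩ | ⟨l, hl, hc⟩ <;>
    (rw [List.eq_of_mem_replicate hl] at hc; simp at hc; subst hc; decide)

-- ===== VERDICT (by name: the statement is the Claim_ definition above) =====
theorem cidr_to_bin_spec : Claim_equal_cidr_to_bin := by
  intro bits _
  unfold Spec_cidr_to_bin cidr_to_bin cidr_to_bin_alt
  set mes := PySem.List.pyRepeat ['1'] bits ++ PySem.List.pyRepeat ['0'] (32 - bits) with hmes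
  simp only []
  rw [foldlA_eq_gA, List.nil_append,
      gA_eq_jt mes 0 8 (by omega) (by omega) (by decide),
      jt_eq_join_chunks, map_slice_eq_chunks8]
  congr 1
  by_cases hne : mes = []
  · simp [hne, chunks8_nil, PySem.Chars.join, PySem.Chars.stripChars, List.intercalate]
  · obtain ⟨hj0, hjh, hjl⟩ := join_chunks_head_last mes hne
    apply stripChars_dots
    · intro c hc; split at hc <;> simp_all
    · rw [hjh]; intro hcon
      exact mem_mask_ne_dot bits '.' (List.mem_of_mem_head? hcon) rfl
    · rw [hjl]; intro hcon
      exact mem_mask_ne_dot bits '.' (List.mem_of_getLast? hcon) rfl
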